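-- pv_equiv track=rewrite | github.com/rohan-dot/Rasa-NLU | bioasq_phase_b.py | consensus_factoid
-- ===== SOURCE A (Python) =====
-- from collections import Counter
--
-- def consensus_factoid(candidates: list[list[str]]) -> list[str]:
--     """Pick the most common factoid answer."""
--     flat = []
--     for c in candidates:
--         if c:
--             flat.append(c[0].lower().strip())
--     if not flat:
--         return ["unknown"]
--     counter = Counter(flat)
--     best = counter.most_common(1)[0][0]
--     # Return the original-cased version
--     for c in candidates:
--         if c and c[0].lower().strip() == best:
--             return c
--     return [best]
-- ===== SOURCE B (Python) =====
-- def consensus_factoid(candidates: list[list[str]]) -> list[str]: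
--     """Dict/Counter-free brute force: for each candidate, count its normalized key
--     by a direct scan over all candidates, keeping the first strict maximum."""
--     best_cnt, best = 0, None
--     for c in candidates:
--         if not c:
--             continue
--         key = c[0].lower().strip()
--         cnt = 0
--         for d in candidates:
--             if d and d[0].lower().strip() == key:
--                 cnt += 1
--         if cnt > best_cnt:
--             best_cnt, best = cnt, c
--     return ["unknown"] if best is None else best
-- ===== Notes on version B (the rewrite author's own statement) =====
-- stated objective: alternative
-- what changed: Replaces the flat list + Counter + second rescan by a dict-free brute-force selection: for each candidate its key's frequency is recomputed by a direct nested scan and the first strict maximum is kept, trading A's O(n) hash counting for O(n^2) scanning with no auxiliary data structure.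
import Mathlib
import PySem

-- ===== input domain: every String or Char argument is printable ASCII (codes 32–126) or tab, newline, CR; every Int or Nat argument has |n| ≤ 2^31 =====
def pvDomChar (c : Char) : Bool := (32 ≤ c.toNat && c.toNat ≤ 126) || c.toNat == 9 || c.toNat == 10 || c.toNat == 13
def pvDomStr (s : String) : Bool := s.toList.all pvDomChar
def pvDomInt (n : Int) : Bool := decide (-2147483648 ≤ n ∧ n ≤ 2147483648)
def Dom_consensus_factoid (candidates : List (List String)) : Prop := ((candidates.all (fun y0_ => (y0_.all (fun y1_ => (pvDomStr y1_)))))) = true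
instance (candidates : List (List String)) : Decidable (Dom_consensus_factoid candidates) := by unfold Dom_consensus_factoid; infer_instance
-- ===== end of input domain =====

-- B drops the flat list, Counter and second rescan entirely: a dict-free brute-force
-- selection recounting each key by a nested scan, keeping the first strict maximum (objective: alternative).

-- ===== PORT A =====
-- c[0].lower().strip()
def pvNorm (s : String) : String := PySem.Str.strip (PySem.Str.lower s)

-- A's final loop: "for c in candidates: if c and c[0].lower().strip() == best: return c" with fallback [best]
def pvFindOrig (best : String) : List (List String) → List String
  | [] => [best]
  | c :: rest =>
    match c with
    | [] => pvFindOrig best rest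
    | x :: _ => if pvNorm x == best then c else pvFindOrig best rest

def consensus_factoid (candidates : List (List String)) : List String :=
  let flat := candidates.foldl (fun acc c =>
    match c with
    | [] => acc
    | x :: _ => acc ++ [pvNorm x]) []
  if flat.isEmpty then ["unknown"]
  else
    let counter := PySem.Dict.counter flat
    -- counter.most_common(1)[0][0]: CPython's most_common(1) is heapq.nlargest(1, items, key=count),
    -- whose n == 1 path is max(items, key=count) — the FIRST maximal item; exact as maxD (default unused).
    let best := (PySem.List.maxD counter.items (fun p => p.2) ("", 0)).1
    pvFindOrig best candidates

-- ===== PORT B =====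
-- B's inner loop: "cnt = 0; for d in candidates: if d and d[0].lower().strip() == key: cnt += 1"
def pvCntB (candidates : List (List String)) (key : String) : Int :=
  candidates.foldl (fun n d =>
    match d with
    | [] => n
    | x :: _ => if pvNorm x == key then n + 1 else n) 0

def consensus_factoid_alt (candidates : List (List String)) : List String :=
  let r := candidates.foldl (fun (b : Int × Option (List String)) c =>
    match c with
    | [] => b
    | x :: _ =>
      let key := pvNorm x
      let cnt := pvCntB candidates key
      if b.1 < cnt then (cnt, some c) else b) ((0 : Int), none)
  match r.2 with
  | none => ["unknown"]
  | some best => best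

-- ===== PRECONDITION & SPEC =====
def Spec_consensus_factoid (candidates : List (List String)) (out : List String) : Prop := out = consensus_factoid_alt candidates
instance (candidates : List (List String)) (out : List String) : Decidable (Spec_consensus_factoid candidates out) := by unfold Spec_consensus_factoid; infer_instance

-- ===== CLAIM (what is proved, stated in full; the proofs are below) =====
def Claim_equal_consensus_factoid : Prop := ∀ (candidates : List (List String)), Dom_consensus_factoid candidates → Spec_consensus_factoid candidates (consensus_factoid candidates)

-- ===== LEMMAS AND PROOFS =====

-- the normalized first elements of the nonempty candidates, in order
def pvKeyFlat (cs : List (List String)) : List String := cs.filterMap (fun c => c.head?.map pvNorm)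

-- the (normalized key, original candidate) pairs of the nonempty candidates, in order
def pvPairs (cs : List (List String)) : List (String × List String) :=
  cs.filterMap (fun c => match c with | [] => none | x :: _ => some (pvNorm x, c))

-- first nonempty candidate whose normalized head is k (none if there is no such candidate)
def pvFirst? (k : String) : List (List String) → Option (List String)
  | [] => none
  | c :: rest =>
    match c with
    | [] => pvFirst? k rest
    | x :: _ => if pvNorm x == k then some c else pvFirst? k rest

-- B's selection step, with the count taken in the fixed flat list fl
def pvStepB (fl : List String) (b : Int × Option (List String)) (p : String × List String) :
    Int × Option (List String) :=
  if b.1 < (fl.count p.1 : Int) then ((fl.count p.1 : Int), some p.2) else b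

-- first-occurrence dedup of a key list, seen keys accumulated
def pvDedupK (seen : List String) : List String → List String
  | [] => []
  | k :: ks => if k ∈ seen then pvDedupK seen ks else k :: pvDedupK (k :: seen) ks

-- first-occurrence dedup of a pair list by key
def pvDedupP (seen : List String) : List (String × List String) → List (String × List String)
  | [] => []
  | p :: ps => if p.1 ∈ seen then pvDedupP seen ps else p :: pvDedupP (p.1 :: seen) ps

theorem pv_flat_eq (cs : List (List String)) : ∀ acc : List String,
    cs.foldl (fun acc c => match c with | [] => acc | x :: _ => acc ++ [pvNorm x]) acc
      = acc ++ pvKeyFlat cs := by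
  induction cs with
  | nil => intro acc; simp [pvKeyFlat]
  | cons c rest ih =>
    intro acc
    cases c with
    | nil => simpa [pvKeyFlat] using ih acc
    | cons x xs => simp [pvKeyFlat, ih]

theorem pv_pairs_keys (cs : List (List String)) : (pvPairs cs).map Prod.fst = pvKeyFlat cs := by
  induction cs with
  | nil => simp [pvPairs, pvKeyFlat]
  | cons c rest ih =>
    cases c with
    | nil => simpa [pvPairs, pvKeyFlat] using ih
    | cons x xs => simp [pvPairs, pvKeyFlat] at ih ⊢; exact ih

theorem pv_findOrig_eq (k : String) (cs : List (List String)) :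
    pvFindOrig k cs = (pvFirst? k cs).getD [k] := by
  induction cs with
  | nil => simp [pvFindOrig, pvFirst?]
  | cons c rest ih =>
    cases c with
    | nil => simpa [pvFindOrig, pvFirst?] using ih
    | cons x xs =>
      by_cases h : pvNorm x == k <;> simp [pvFindOrig, pvFirst?, h, ih]

theorem pv_first?_isSome (k : String) (cs : List (List String)) :
    k ∈ pvKeyFlat cs ↔ (pvFirst? k cs).isSome := by
  induction cs with
  | nil => simp [pvKeyFlat, pvFirst?]
  | cons c rest ih =>
    cases c with
    | nil => simpa [pvKeyFlat, pvFirst?, List.filterMap_cons] using ih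
    | cons x xs =>
      by_cases h : pvNorm x = k
      · simp [pvKeyFlat, pvFirst?, h]
      · have hb : (pvNorm x == k) = false := by simp [h]
        have h2 : pvKeyFlat ((x :: xs) :: rest) = pvNorm x :: pvKeyFlat rest := by
          simp [pvKeyFlat]
        rw [h2, List.mem_cons, ih]
        simp only [pvFirst?, hb]
        simp only [Bool.false_eq_true, if_false]
        have hnk : ¬ k = pvNorm x := fun hh => h hh.symm
        exact ⟨fun hh => hh.resolve_left hnk, Or.inr⟩

-- B's inner scan computes the count of key in the flat list
theorem pv_cntB_eq (cs : List (List String)) (key : String) :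
    pvCntB cs key = ((pvKeyFlat cs).count key : Int) := by
  unfold pvCntB
  suffices h : ∀ n : Int, cs.foldl (fun n d =>
      match d with
      | [] => n
      | x :: _ => if pvNorm x == key then n + 1 else n) n
      = n + ((pvKeyFlat cs).count key : Int) by
    simpa using h 0
  induction cs with
  | nil => intro n; simp [pvKeyFlat]
  | cons c rest ih =>
    intro n
    cases c with
    | nil => simpa [pvKeyFlat] using ih n
    | cons x xs =>
      rw [List.foldl_cons]
      have hfl : pvKeyFlat ((x :: xs) :: rest) = pvNorm x :: pvKeyFlat rest := by
        simp [pvKeyFlat]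
      rw [hfl]
      show List.foldl _ (if pvNorm x == key then n + 1 else n) rest = _
      by_cases h : pvNorm x == key
      · have hx : pvNorm x = key := by simpa using h
        rw [if_pos h, ih (n + 1), List.count_cons]
        simp [hx]
        ring
      · have hx : ¬ (pvNorm x = key) := by simpa using h
        rw [if_neg h, ih n, List.count_cons]
        simp [hx]

-- B's outer loop over candidates is pvStepB folded over the key/candidate pairs
theorem pv_fold_pairs (cands : List (List String)) : ∀ (cs : List (List String))
    (b : Int × Option (List String)),
    cs.foldl (fun (b : Int × Option (List String)) c =>
      match c with
      | [] => b
      | x :: _ =>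
        let key := pvNorm x
        let cnt := pvCntB cands key
        if b.1 < cnt then (cnt, some c) else b) b
      = (pvPairs cs).foldl (pvStepB (pvKeyFlat cands)) b := by
  intro cs
  induction cs with
  | nil => intro b; simp [pvPairs]
  | cons c rest ih =>
    intro b
    cases c with
    | nil => simpa [pvPairs] using ih b
    | cons x xs =>
      simp only [List.foldl_cons, pvPairs, List.filterMap_cons]
      rw [pv_cntB_eq cands (pvNorm x)]
      exact ih _

-- pairs whose key count is already reached never change the accumulator: dedup them away
theorem pv_dedup_fold (fl : List String) : ∀ (ps : List (String × List String))
    (seen : List String) (b : Int × Option (List String)),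
    (∀ k ∈ seen, (fl.count k : Int) ≤ b.1) →
    ps.foldl (pvStepB fl) b = (pvDedupP seen ps).foldl (pvStepB fl) b := by
  intro ps
  induction ps with
  | nil => intro seen b _; simp [pvDedupP]
  | cons p ps ih =>
    intro seen b hseen
    by_cases hm : p.1 ∈ seen
    · have hle := hseen p.1 hm
      have hstep : pvStepB fl b p = b := by
        unfold pvStepB; rw [if_neg (by omega)]
      rw [pvDedupP, if_pos hm, List.foldl_cons, hstep]
      exact ih seen b hseen
    · rw [pvDedupP, if_neg hm, List.foldl_cons, List.foldl_cons]
      apply ih (p.1 :: seen)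
      intro k hk
      rcases List.mem_cons.mp hk with hk1 | hk1
      · subst hk1
        unfold pvStepB
        by_cases h : b.1 < (fl.count p.1 : Int)
        · rw [if_pos h]
        · rw [if_neg h]; omega
      · have := hseen k hk1
        unfold pvStepB
        by_cases h : b.1 < (fl.count p.1 : Int)
        · rw [if_pos h]; simp only []; omega
        · rw [if_neg h]; exact this

-- first candidate in cs with key k, via find? over the pairs
theorem pv_findP_eq (k : String) (cs : List (List String)) :
    (pvPairs cs).find? (fun p => p.1 == k) = (pvFirst? k cs).map (fun c => (k, c)) := by
  induction cs with
  | nil => simp [pvPairs, pvFirst?]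
  | cons c rest ih =>
    cases c with
    | nil => simpa [pvPairs, pvFirst?] using ih
    | cons x xs =>
      have hp : pvPairs ((x :: xs) :: rest) = (pvNorm x, x :: xs) :: pvPairs rest := by
        simp [pvPairs]
      have hf : pvFirst? k ((x :: xs) :: rest)
          = if pvNorm x == k then some (x :: xs) else pvFirst? k rest := by
        by_cases h : pvNorm x == k <;> simp [pvFirst?, h]
      rw [hp, hf]
      by_cases h : pvNorm x == k
      · have hx : pvNorm x = k := by simpa using h
        rw [if_pos h, List.find?_cons_of_pos (by simpa using h), hx]
        simp
      · rw [if_neg h, List.find?_cons_of_neg (by simpa using h)]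
        exact ih

theorem pv_dedupK_not_seen :
    ∀ (ks seen : List String) (j : String), j ∈ pvDedupK seen ks → j ∉ seen := by
  intro ks
  induction ks with
  | nil => intro seen j h; simp [pvDedupK] at h
  | cons k ks ih =>
    intro seen j h
    rw [pvDedupK] at h
    by_cases hm : k ∈ seen
    · rw [if_pos hm] at h; exact ih seen j h
    · rw [if_neg hm] at h
      rcases List.mem_cons.mp h with rfl | h
      · exact hm
      · have := ih (k :: seen) j h
        exact fun hc => this (List.mem_cons_of_mem k hc)

-- the deduped pair list is the deduped key list paired with the first candidate per key
theorem pv_dedupP_char : ∀ (ps : List (String × List String)) (seen : List String),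
    pvDedupP seen ps
      = (pvDedupK seen (ps.map Prod.fst)).map
          (fun k => (k, ((ps.find? (fun p => p.1 == k)).map Prod.snd).getD [])) := by
  intro ps
  induction ps with
  | nil => intro seen; simp [pvDedupP, pvDedupK]
  | cons p ps ih =>
    intro seen
    obtain ⟨k, c⟩ := p
    simp only [pvDedupP, pvDedupK, List.map_cons]
    by_cases hm : k ∈ seen
    · rw [if_pos hm, if_pos hm, ih seen]
      apply List.map_congr_left
      intro j hj
      have hjk : j ≠ k := fun hh => (pv_dedupK_not_seen _ seen j hj) (hh ▸ hm)
      have hb : ((k, c).1 == j) = false := by simpa using fun hh => hjk hh.symm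
      rw [List.find?_cons, hb]
    · rw [if_neg hm, if_neg hm, List.map_cons, ih (k :: seen)]
      have hhd : ((k, c).1 == k) = true := by simp
      rw [List.find?_cons, hhd]
      simp only [Option.map_some, Option.getD_some]
      congr 1
      apply List.map_congr_left
      intro j hj
      have hjns := pv_dedupK_not_seen _ (k :: seen) j hj
      have hjk : j ≠ k := fun hh => hjns (hh ▸ List.mem_cons_self ..)
      have hb : ((k, c).1 == j) = false := by simpa using fun hh => hjk hh.symm
      rw [List.find?_cons, hb]

-- dedup depends on seen only through membership
theorem pv_dedupK_congr : ∀ (ks s1 s2 : List String), (∀ j, j ∈ s1 ↔ j ∈ s2) →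
    pvDedupK s1 ks = pvDedupK s2 ks := by
  intro ks
  induction ks with
  | nil => intro s1 s2 _; simp [pvDedupK]
  | cons k ks ih =>
    intro s1 s2 h
    rw [pvDedupK, pvDedupK]
    by_cases hm : k ∈ s1
    · rw [if_pos hm, if_pos ((h k).mp hm)]; exact ih s1 s2 h
    · rw [if_neg hm, if_neg (fun hc => hm ((h k).mpr hc))]
      refine congrArg _ (ih _ _ ?_)
      intro j; simp [h j]

-- set(xs): PySem.Set.ofList is the first-occurrence dedup
theorem pv_ofList_dedupK : ∀ (l s : List String),
    l.foldl PySem.Set.add s = s ++ pvDedupK s l := by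
  intro l
  induction l with
  | nil => intro s; simp [pvDedupK]
  | cons k l ih =>
    intro s
    rw [List.foldl_cons, ih, pvDedupK]
    by_cases hm : k ∈ s
    · rw [if_pos hm]
      have : PySem.Set.add s k = s := by
        simp [PySem.Set.add, PySem.Set.contains]; exact hm
      rw [this]
    · rw [if_neg hm]
      have h1 : PySem.Set.add s k = s ++ [k] := by
        simp [PySem.Set.add, PySem.Set.contains]; exact hm
      rw [h1, pv_dedupK_congr l (s ++ [k]) (k :: s) (by intro j; simp; tauto)]
      simp

-- the common selector: first key with strictly maximal count, scanning left to right
def pvSel (fl : List String) : String → List String → String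
  | k0, [] => k0
  | k0, x :: l => pvSel fl (if (List.count k0 fl : Int) < (List.count x fl : Int) then x else k0) l

theorem pvSel_mem (fl : List String) (ms : List String) : ∀ k0 : String,
    pvSel fl k0 ms ∈ k0 :: ms := by
  induction ms with
  | nil => intro k0; simp [pvSel]
  | cons x l ih =>
    intro k0
    rw [pvSel]
    by_cases h : (List.count k0 fl : Int) < (List.count x fl : Int)
    · rw [if_pos h]
      rcases List.mem_cons.mp (ih x) with h1 | h1 <;> simp [h1]
    · rw [if_neg h]
      rcases List.mem_cons.mp (ih k0) with h1 | h1 <;> simp [h1]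

-- A's selection: maxD over the counter items picks (pvSel, its count)
theorem pv_maxD_eq (fl : List String) (ms : List String) : ∀ k0 : String,
    (PySem.List.maxD ((k0, (List.count k0 fl : Int))
          :: ms.map (fun k => (k, (List.count k fl : Int))))
        (fun p => p.2) ("", 0)).1 = pvSel fl k0 ms := by
  induction ms with
  | nil => intro k0; simp [PySem.List.maxD, PySem.List.max?, pvSel]
  | cons x l ih =>
    intro k0
    by_cases h : (List.count k0 fl : Int) < (List.count x fl : Int)
    · simpa [PySem.List.maxD, PySem.List.max?, pvSel, h] using ih x
    · simpa [PySem.List.maxD, PySem.List.max?, pvSel, h] using ih k0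

-- B's selection over the deduped pairs, after the first pair has replaced (0, none)
theorem pv_scan_go (fl : List String) (orig : String → List String) (ms : List String) :
    ∀ k0 : String,
    List.foldl (pvStepB fl) ((List.count k0 fl : Int), some (orig k0))
        (ms.map (fun k => (k, orig k)))
      = ((List.count (pvSel fl k0 ms) fl : Int), some (orig (pvSel fl k0 ms))) := by
  induction ms with
  | nil => intro k0; simp [pvSel]
  | cons x l ih =>
    intro k0
    by_cases h : (List.count k0 fl : Int) < (List.count x fl : Int)
    · simpa [pvSel, pvStepB, h] using ih x
    · simpa [pvSel, pvStepB, h] using ih k0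

-- ===== VERDICT (by name: the statement is the Claim_ definition above) =====
theorem consensus_factoid_spec : Claim_equal_consensus_factoid := by
  intro candidates _
  show consensus_factoid candidates = consensus_factoid_alt candidates
  unfold consensus_factoid consensus_factoid_alt
  dsimp only
  rw [pv_flat_eq, pv_fold_pairs,
    pv_dedup_fold (pvKeyFlat candidates) (pvPairs candidates) [] _ (by simp),
    pv_dedupP_char (pvPairs candidates) [], pv_pairs_keys]
  simp only [List.nil_append]
  by_cases hc : pvKeyFlat candidates = []
  · have hps : pvPairs candidates = [] := by
      have := pv_pairs_keys candidates
      rw [hc] at this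
      exact List.map_eq_nil_iff.mp this
    rw [hc, hps]
    simp [pvDedupK]
  · have hne : (pvKeyFlat candidates).isEmpty = false := by
      simpa [List.isEmpty_iff] using hc
    have hofl : PySem.Set.ofList (pvKeyFlat candidates) = pvDedupK [] (pvKeyFlat candidates) := by
      rw [PySem.Set.ofList_eq_foldl, pv_ofList_dedupK]
      simp
    obtain ⟨k0, ms, hm⟩ : ∃ k0 ms, pvDedupK [] (pvKeyFlat candidates) = k0 :: ms := by
      cases h : pvDedupK [] (pvKeyFlat candidates) with
      | nil =>
        exfalso
        obtain ⟨y, hy⟩ := List.exists_mem_of_ne_nil _ hc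
        have hmem := (PySem.Set.mem_ofList (pvKeyFlat candidates) y).mpr hy
        rw [hofl, h] at hmem
        simp at hmem
      | cons a l => exact ⟨a, l, rfl⟩
    have hmem0 : k0 ∈ pvKeyFlat candidates := by
      have : k0 ∈ pvDedupK [] (pvKeyFlat candidates) := by rw [hm]; exact List.mem_cons_self ..
      rw [← hofl] at this
      exact (PySem.Set.mem_ofList _ _).mp this
    rw [PySem.Dict.items_counter, hofl, hm, hne]
    simp only [Bool.false_eq_true, if_false, List.map_cons]
    rw [pv_maxD_eq]
    -- simplify the map bodies: find? over pairs → pvFirst?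
    have hbody : ∀ k : String,
        (((pvPairs candidates).find? (fun p => p.1 == k)).map Prod.snd).getD []
          = (pvFirst? k candidates).getD [] := by
      intro k
      rw [pv_findP_eq]
      cases pvFirst? k candidates <;> simp
    simp only [hbody]
    -- B: first fold step replaces (0, none)
    have hcnt0 : (0 : Int) < ((pvKeyFlat candidates).count k0 : Int) := by
      have := List.count_pos_iff.mpr hmem0
      omega
    rw [List.foldl_cons]
    have hstep0 : pvStepB (pvKeyFlat candidates) ((0 : Int), none)
        (k0, (pvFirst? k0 candidates).getD [])
        = (((pvKeyFlat candidates).count k0 : Int), some ((pvFirst? k0 candidates).getD [])) := by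
      unfold pvStepB
      rw [if_pos hcnt0]
    rw [hstep0,
      pv_scan_go (pvKeyFlat candidates) (fun k => (pvFirst? k candidates).getD []) ms k0,
      pv_findOrig_eq]
    have hKfl : pvSel (pvKeyFlat candidates) k0 ms ∈ pvKeyFlat candidates := by
      have h1 := pvSel_mem (pvKeyFlat candidates) ms k0
      rw [← hm] at h1
      rw [← hofl] at h1
      exact (PySem.Set.mem_ofList _ _).mp h1
    obtain ⟨v, hv⟩ := Option.isSome_iff_exists.mp ((pv_first?_isSome _ candidates).mp hKfl)
    simp [hv]
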